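-- pv_equiv track=rewrite | github.com/emmanueljordy/IndivClaimsLLM | tabula_middle_padding_compromise/tabula_utils.py | _parse_cell_with_longest_prefix
-- ===== SOURCE A (Python) =====
-- def _parse_cell_with_longest_prefix(text: str, known_columns: list) -> tuple[str, str]:
--     """FIX D: Parse cell text using longest-prefix matching for robust key-value extraction.
--
--     Args:
--         text: Cell text to parse (may be "ColumnName value" format)
--         known_columns: List of valid column names to match against
--
--     Returns:
--         tuple: (column_name, value) where column_name="" if no match found
--     """
--     if not text.strip():
--         return "", ""
--
--     tokens = text.split()
--     if not tokens:
--         return "", ""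
--
--     # Try to find longest matching column name prefix
--     name = None
--     split_at = None
--     for i in range(len(tokens), 0, -1):
--         candidate = " ".join(tokens[:i])
--         if candidate in known_columns:
--             name = candidate
--             split_at = i
--             break
--
--     # If no known column found, use first token as name
--     if name is None:
--         name = tokens[0] if tokens else ""
--         value = " ".join(tokens[1:]) if len(tokens) > 1 else ""
--     else:
--         value = " ".join(tokens[split_at:]) if split_at < len(tokens) else ""
--
--     return name, value
-- ===== SOURCE B (Python) =====
-- def _parse_cell_with_longest_prefix(text: str, known_columns: list) -> tuple[str, str]:
--     """Alternative: scan the known columns once, keeping the candidate that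
--     matches the longest token prefix, instead of trying prefix lengths from
--     the top with a membership test."""
--     if not text.strip():
--         return "", ""
--     tokens = text.split()
--     if not tokens:
--         return "", ""
--     best_i = 0
--     best_col = None
--     for col in known_columns:
--         for i in range(1, len(tokens) + 1):
--             if i > best_i and " ".join(tokens[:i]) == col:
--                 best_i, best_col = i, col
--     if best_col is None:
--         return tokens[0], " ".join(tokens[1:])
--     return best_col, " ".join(tokens[best_i:])
-- ===== Notes on version B (the rewrite author's own statement) =====
-- stated objective: alternative
-- what changed: B scans known_columns and keeps the column matching the longest token prefix (argmax over columns), instead of A's descending loop over prefix lengths with a membership test that breaks at the first hit.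
import Mathlib
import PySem

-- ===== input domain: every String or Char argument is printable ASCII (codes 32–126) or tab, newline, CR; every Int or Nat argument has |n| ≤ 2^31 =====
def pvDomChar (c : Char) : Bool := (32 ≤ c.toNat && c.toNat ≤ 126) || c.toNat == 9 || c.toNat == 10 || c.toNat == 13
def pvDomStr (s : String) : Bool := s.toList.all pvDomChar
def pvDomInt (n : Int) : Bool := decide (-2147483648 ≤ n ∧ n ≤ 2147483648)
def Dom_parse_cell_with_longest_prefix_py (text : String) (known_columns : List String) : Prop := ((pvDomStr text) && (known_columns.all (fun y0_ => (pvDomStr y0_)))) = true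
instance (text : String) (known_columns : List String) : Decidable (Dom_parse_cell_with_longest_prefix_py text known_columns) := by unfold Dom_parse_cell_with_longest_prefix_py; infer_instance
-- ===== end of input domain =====

-- B replaces A's descending scan over prefix lengths by an argmax scan over the known columns; alternative decomposition, same cost class.

-- ===== PORT A =====
-- A's `for i in range(len(tokens), 0, -1): … break` loop: first prefix length,
-- counted down from len(tokens), whose joined prefix is a known column.
def goA (tokens known_columns : List String) : Nat → Option (String × Nat)
  | 0 => none
  | i + 1 =>
    if PySem.Str.join " " (tokens.take (i + 1)) ∈ known_columns then
      some (PySem.Str.join " " (tokens.take (i + 1)), i + 1)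
    else goA tokens known_columns i

def parse_cell_with_longest_prefix_py (text : String) (known_columns : List String) : String × String :=
  if PySem.Str.strip text = "" then ("", "")
  else if PySem.Str.split₀ text = [] then ("", "")
  else
    match goA (PySem.Str.split₀ text) known_columns (PySem.Str.split₀ text).length with
    | some (name, split_at) =>
        (name,
         if split_at < (PySem.Str.split₀ text).length then
           PySem.Str.join " " ((PySem.Str.split₀ text).drop split_at)
         else "")
    | none =>
        (if PySem.Str.split₀ text = [] then "" else (PySem.Str.split₀ text).headD "",
         if 1 < (PySem.Str.split₀ text).length then
           PySem.Str.join " " ((PySem.Str.split₀ text).drop 1)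
         else "")

-- ===== PORT B =====
-- Source B's inner loop `for i in range(1, len(tokens)+1)` over one column col,
-- updating (best_i, best_col) when i > best_i and ' '.join(tokens[:i]) == col.
def innerB (tokens : List String) (col : String) (st : Nat × Option String) : Nat × Option String :=
  (List.range tokens.length).foldl
    (fun st j =>
      if st.1 < j + 1 ∧ PySem.Str.join " " (tokens.take (j + 1)) = col then (j + 1, some col)
      else st)
    st

-- Source B's outer loop over known_columns, starting from best_i = 0, best_col = None
def bestB (tokens known_columns : List String) : Nat × Option String :=
  known_columns.foldl (fun st col => innerB tokens col st) (0, none)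

def parse_cell_with_longest_prefix_py_alt (text : String) (known_columns : List String) : String × String :=
  if PySem.Str.strip text = "" then ("", "")
  else if PySem.Str.split₀ text = [] then ("", "")
  else
    match bestB (PySem.Str.split₀ text) known_columns with
    | (best_i, some best_col) =>
        (best_col, PySem.Str.join " " ((PySem.Str.split₀ text).drop best_i))
    | (_, none) =>
        ((PySem.Str.split₀ text).headD "",
         PySem.Str.join " " ((PySem.Str.split₀ text).drop 1))

-- ===== PRECONDITION & SPEC =====
def Spec_parse_cell_with_longest_prefix_py (text : String) (known_columns : List String) (out : String × String) : Prop := out = parse_cell_with_longest_prefix_py_alt text known_columns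
instance (text : String) (known_columns : List String) (out : String × String) : Decidable (Spec_parse_cell_with_longest_prefix_py text known_columns out) := by unfold Spec_parse_cell_with_longest_prefix_py; infer_instance

-- ===== CLAIM (what is proved, stated in full; the proofs are below) =====
def Claim_equal_parse_cell_with_longest_prefix_py : Prop := ∀ (text : String) (known_columns : List String), Dom_parse_cell_with_longest_prefix_py text known_columns → Spec_parse_cell_with_longest_prefix_py text known_columns (parse_cell_with_longest_prefix_py text known_columns)

-- ===== LEMMAS AND PROOFS =====

-- largest i ≤ k with ' '.join(tokens[:i]) = col, 0 if none
def mS (tokens : List String) (col : String) : Nat → Nat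
  | 0 => 0
  | k + 1 => if PySem.Str.join " " (tokens.take (k + 1)) = col then k + 1 else mS tokens col k

-- largest i ≤ k with ' '.join(tokens[:i]) ∈ kn, 0 if none
def mA (tokens kn : List String) : Nat → Nat
  | 0 => 0
  | k + 1 => if PySem.Str.join " " (tokens.take (k + 1)) ∈ kn then k + 1 else mA tokens kn k

theorem mS_le (t : List String) (c : String) (k : Nat) : mS t c k ≤ k := by
  induction k with
  | zero => simp [mS]
  | succ k ih => rw [mS]; split <;> omega

theorem mA_le (t kn : List String) (k : Nat) : mA t kn k ≤ k := by
  induction k with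
  | zero => simp [mA]
  | succ k ih => rw [mA]; split <;> omega

theorem join_mS (t : List String) (c : String) (k : Nat) (h : mS t c k ≠ 0) :
    PySem.Str.join " " (t.take (mS t c k)) = c := by
  induction k with
  | zero => simp [mS] at h
  | succ k ih =>
    rw [mS] at h ⊢
    by_cases hc : PySem.Str.join " " (t.take (k + 1)) = c
    · rw [if_pos hc]; exact hc
    · rw [if_neg hc] at h ⊢; exact ih h

theorem mA_nil (t : List String) (k : Nat) : mA t [] k = 0 := by
  induction k with
  | zero => rfl
  | succ k ih => simp [mA, ih]

theorem mA_cons (t : List String) (c : String) (r : List String) (k : Nat) :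
    mA t (c :: r) k = max (mS t c k) (mA t r k) := by
  induction k with
  | zero => simp [mA, mS]
  | succ k ih =>
    have hS := mS_le t c k
    have hA := mA_le t r k
    by_cases h1 : PySem.Str.join " " (t.take (k + 1)) = c
    · simp [mA, mS, h1]
      split <;> omega
    · by_cases h2 : PySem.Str.join " " (t.take (k + 1)) ∈ r
      · simp [mA, mS, h1, h2]
        omega
      · simp [mA, mS, h1, h2, ih]

theorem goA_eq (t kn : List String) (k : Nat) :
    goA t kn k = if mA t kn k = 0 then none
                 else some (PySem.Str.join " " (t.take (mA t kn k)), mA t kn k) := by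
  induction k with
  | zero => simp [goA, mA]
  | succ k ih =>
    rw [goA, mA]
    by_cases h : PySem.Str.join " " (t.take (k + 1)) ∈ kn
    · rw [if_pos h, if_pos h, if_neg (by omega)]
    · rw [if_neg h, if_neg h, ih]

theorem inner_aux (t : List String) (c : String) (k : Nat) :
    ∀ b o, (List.range k).foldl
        (fun st j =>
          if st.1 < j + 1 ∧ PySem.Str.join " " (t.take (j + 1)) = c then (j + 1, some c)
          else st) (b, o)
      = if b < mS t c k then (mS t c k, some c) else (b, o) := by
  induction k with
  | zero => intro b o; simp [mS]
  | succ k ih =>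
    intro b o
    rw [List.range_succ, List.foldl_append, ih, List.foldl_cons, List.foldl_nil]
    have hS := mS_le t c k
    by_cases hc : PySem.Str.join " " (t.take (k + 1)) = c
    · by_cases hb : b < mS t c k
      · simp only [mS, if_pos hc, if_pos hb]
        rw [if_pos ⟨by omega, hc⟩, if_pos (show b < k + 1 by omega)]
      · simp [mS, hc, hb]
    · by_cases hb : b < mS t c k
      · simp only [mS, if_neg hc, if_pos hb]
        rw [if_neg (by rintro ⟨-, h⟩; exact hc h)]
      · simp only [mS, if_neg hc, if_neg hb]
        rw [if_neg (by rintro ⟨-, h⟩; exact hc h)]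

theorem inner_eq (t : List String) (c : String) (b : Nat) (o : Option String) :
    innerB t c (b, o)
      = if b < mS t c t.length then (mS t c t.length, some c) else (b, o) := by
  rw [innerB, inner_aux]

theorem outer_eq (t : List String) (cols : List String) :
    ∀ b o, cols.foldl (fun st col => innerB t col st) (b, o)
      = if b < mA t cols t.length then
          (mA t cols t.length, some (PySem.Str.join " " (t.take (mA t cols t.length))))
        else (b, o) := by
  induction cols with
  | nil => intro b o; simp [mA_nil]
  | cons c r ih =>
    intro b o
    rw [List.foldl_cons, inner_eq, mA_cons]
    by_cases hb : b < mS t c t.length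
    · rw [if_pos hb, ih]
      by_cases h2 : mS t c t.length < mA t r t.length
      · rw [if_pos h2, if_pos (by omega), Nat.max_eq_right (by omega)]
      · rw [if_neg h2, if_pos (by omega), Nat.max_eq_left (by omega),
            join_mS t c t.length (by omega)]
    · rw [if_neg hb, ih]
      by_cases h2 : b < mA t r t.length
      · rw [if_pos h2, if_pos (by omega), Nat.max_eq_right (by omega)]
      · rw [if_neg h2, if_neg (by omega)]

theorem join_nil_str : PySem.Str.join " " ([] : List String) = "" := by
  decide

-- ===== VERDICT (by name: the statement is the Claim_ definition above) =====
theorem parse_cell_with_longest_prefix_py_spec : Claim_equal_parse_cell_with_longest_prefix_py := by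
  intro text known_columns _
  unfold Spec_parse_cell_with_longest_prefix_py
  unfold parse_cell_with_longest_prefix_py parse_cell_with_longest_prefix_py_alt bestB
  by_cases hs : PySem.Str.strip text = ""
  · rw [if_pos hs, if_pos hs]
  · rw [if_neg hs, if_neg hs]
    set tokens := PySem.Str.split₀ text with ht
    by_cases he : tokens = []
    · rw [if_pos he, if_pos he]
    · rw [if_neg he, if_neg he, goA_eq, outer_eq]
      have hnz : 0 < tokens.length := List.length_pos_iff.mpr he
      have hle := mA_le tokens known_columns tokens.length
      by_cases hm : mA tokens known_columns tokens.length = 0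
      · rw [if_pos hm,
            if_neg (show ¬ 0 < mA tokens known_columns tokens.length by omega),
            if_neg he]
        by_cases hlen : 1 < tokens.length
        · simp [hlen]
        · simp [hlen, List.drop_eq_nil_of_le (show tokens.length ≤ 1 by omega), join_nil_str]
      · rw [if_neg hm,
            if_pos (show 0 < mA tokens known_columns tokens.length by omega)]
        by_cases hlt : mA tokens known_columns tokens.length < tokens.length
        · simp [he, hlt]
        · rw [show mA tokens known_columns tokens.length = tokens.length by omega]
          simp [he, List.drop_length, join_nil_str]
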